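-- pv_equiv track=rewrite | github.com/mkhnuser/algoexpert_algo_problems | topological_sort.py | _dfs
-- ===== SOURCE A (Python) =====
-- def _dfs(job, adj_list, colors, entry, leave, time):
--     time += 1
--     colors[job] = "gray"
--     entry[job] = time
--
--     for n in adj_list[job]:
--         if colors[n] == "white":
--             time = _dfs(n, adj_list, colors, entry, leave, time)
--
--     time += 1
--     leave[job] = time
--     colors[job] = "black"
--     return time
-- ===== SOURCE B (Python) =====
-- def _dfs(job, adj_list, colors, entry, leave, time):
--     time += 1
--     colors[job] = "gray"
--     entry[job] = time
--     stack = [(job, 0)]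
--     while stack:
--         node, i = stack[-1]
--         neighbors = adj_list[node]
--         if i < len(neighbors):
--             stack[-1] = (node, i + 1)
--             n = neighbors[i]
--             if colors[n] == "white":
--                 time += 1
--                 colors[n] = "gray"
--                 entry[n] = time
--                 stack.append((n, 0))
--         else:
--             time += 1
--             leave[node] = time
--             colors[node] = "black"
--             stack.pop()
--     return time
-- ===== Notes on version B (the rewrite author's own statement) =====
-- stated objective: alternative
-- what changed: A's recursive DFS is replaced by an iterative while-loop over an explicit stack of (node, next-neighbour-index) frames that performs the same colour checks, time increments and dict updates in the same interleaving without Python recursion.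
import Mathlib
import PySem

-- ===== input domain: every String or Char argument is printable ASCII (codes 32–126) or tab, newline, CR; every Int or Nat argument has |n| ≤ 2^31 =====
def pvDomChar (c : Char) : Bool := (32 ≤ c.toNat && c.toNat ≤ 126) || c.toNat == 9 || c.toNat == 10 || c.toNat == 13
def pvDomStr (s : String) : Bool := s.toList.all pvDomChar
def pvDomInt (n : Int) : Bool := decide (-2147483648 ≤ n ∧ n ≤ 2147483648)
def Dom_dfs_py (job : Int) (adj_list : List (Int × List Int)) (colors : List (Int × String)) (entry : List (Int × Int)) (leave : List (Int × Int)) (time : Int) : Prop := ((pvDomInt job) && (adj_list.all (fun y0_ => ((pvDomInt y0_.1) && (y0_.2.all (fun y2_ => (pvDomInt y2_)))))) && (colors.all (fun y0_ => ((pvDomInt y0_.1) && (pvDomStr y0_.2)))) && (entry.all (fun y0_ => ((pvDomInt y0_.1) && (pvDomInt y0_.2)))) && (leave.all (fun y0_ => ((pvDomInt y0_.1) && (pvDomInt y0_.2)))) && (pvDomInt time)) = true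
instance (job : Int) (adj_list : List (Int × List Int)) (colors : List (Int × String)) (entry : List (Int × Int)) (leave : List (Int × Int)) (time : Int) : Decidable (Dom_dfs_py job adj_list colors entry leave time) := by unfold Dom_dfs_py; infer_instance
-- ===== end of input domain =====

-- B replaces A's recursive DFS by an iterative loop over an explicit stack of (node, next-neighbour-index)
-- frames (same mutations of the four dicts, in the same order); only the RETURNED time is proved equal here.

-- ===== PORT A =====
-- number of "white" entries of a colour dict: used only as the (provably sufficient) fuel bound of
-- port A's recursion and as the termination measure of port B's loop
def pvW (d : PySem.Dict Int String) : Nat :=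
  (d.items.filter (fun p => p.2 == "white")).length

-- inserting a non-white colour never increases the white count (cited by dfsB's termination proof)
theorem pvW_aux_le (k : Int) (v : String) (hv : (v == "white") = false) :
    ∀ l : List (Int × String),
      ((l.map (fun p => if p.1 = k then (k, v) else p)).filter
          (fun p => p.2 == "white")).length ≤
        (l.filter (fun p => p.2 == "white")).length := by
  intro l
  induction l with
  | nil => simp
  | cons p l ih =>
    by_cases hk : p.1 = k <;> by_cases hw : (p.2 == "white") = true <;>
      simp [hk, hv, hw] <;> omega

theorem pvW_insert_le (d : PySem.Dict Int String) (k : Int) (v : String)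
    (hv : (v == "white") = false) : pvW (d.insert k v) ≤ pvW d := by
  by_cases hc : d.contains k = true
  · unfold pvW
    rw [PySem.Dict.items_insert_of_contains d v hc]
    simp only [beq_iff_eq]
    exact pvW_aux_le k v hv d.items
  · unfold pvW
    rw [PySem.Dict.items_insert_of_not_contains d v (by simpa using hc)]
    simp [List.filter_append, hv]

theorem pvW_aux_lt (k : Int) (v : String) (hv : (v == "white") = false) :
    ∀ l : List (Int × String),
      (PySem.Dict.mk l).get? k = some "white" →
      ((l.map (fun p => if p.1 = k then (k, v) else p)).filter
          (fun p => p.2 == "white")).length <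
        (l.filter (fun p => p.2 == "white")).length := by
  intro l
  induction l with
  | nil =>
    intro h
    exact absurd h (by simp [show (⟨[]⟩ : PySem.Dict Int String).get? k = none from rfl])
  | cons p l ih =>
    intro hget
    obtain ⟨p1, p2⟩ := p
    rw [PySem.Dict.get?_mk_cons] at hget
    by_cases hk : p1 = k
    · rw [if_pos (by simp [hk])] at hget
      have hp2 : p2 = "white" := by simpa using hget
      have := pvW_aux_le k v hv l
      simp [hk, hv, hp2]
      omega
    · rw [if_neg (by simp [hk])] at hget
      have hlt := ih hget
      by_cases hw : (p2 == "white") = true <;>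
        simp [hk, hw] <;> omega

-- inserting a non-white colour at a currently-white key strictly decreases the white count
theorem pvW_insert_lt (d : PySem.Dict Int String) (k : Int) (v : String)
    (hv : (v == "white") = false) (hw : (d.getD k "" == "white") = true) :
    pvW (d.insert k v) < pvW d := by
  rw [PySem.Dict.getD_eq_get?_getD] at hw
  rcases h : d.get? k with _ | s
  · rw [h] at hw; exact absurd hw (by decide)
  · rw [h] at hw
    have hs : s = "white" := by simpa using hw
    subst hs
    have hc : d.contains k = true := by rw [PySem.Dict.contains_eq_isSome_get?, h]; rfl
    unfold pvW
    rw [PySem.Dict.items_insert_of_contains d v hc]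
    simp only [beq_iff_eq]
    exact pvW_aux_lt k v hv d.items (by obtain ⟨l⟩ := d; exact h)

-- literal transliteration of A's recursive `_dfs`; the fuel argument only makes the recursion
-- structural (dfs_py supplies pvW colors + 1, which the simulation proof shows is never exhausted).
-- `adj_list[job]` / `colors[n]` are KeyError in Python when the key is absent: those inputs are
-- excluded by Pre_dfs_py, the port reads a default there.
mutual
def dfsA (fuel : Nat) (adj : PySem.Dict Int (List Int)) (job : Int)
    (c : PySem.Dict Int String) (e : PySem.Dict Int Int) (l : PySem.Dict Int Int) (t : Int) :
    PySem.Dict Int String × PySem.Dict Int Int × PySem.Dict Int Int × Int :=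
  match fuel with
  | 0 => (c, e, l, t)
  | f + 1 =>
    let s := dfsAGo f adj (adj.getD job []) (c.insert job "gray") (e.insert job (t + 1)) l (t + 1)
    (s.1.insert job "black", s.2.1, s.2.2.1.insert job (s.2.2.2 + 1), s.2.2.2 + 1)
  termination_by (fuel, 0)

def dfsAGo (f : Nat) (adj : PySem.Dict Int (List Int)) (ns : List Int)
    (c : PySem.Dict Int String) (e : PySem.Dict Int Int) (l : PySem.Dict Int Int) (t : Int) :
    PySem.Dict Int String × PySem.Dict Int Int × PySem.Dict Int Int × Int :=
  match ns with
  | [] => (c, e, l, t)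
  | n :: ns' =>
    if (c.getD n "" == "white") = true then
      let s := dfsA f adj n c e l t
      dfsAGo f adj ns' s.1 s.2.1 s.2.2.1 s.2.2.2
    else
      dfsAGo f adj ns' c e l t
  termination_by (f, ns.length + 1)
end

def dfs_py (job : Int) (adj_list : List (Int × List Int)) (colors : List (Int × String)) (entry : List (Int × Int)) (leave : List (Int × Int)) (time : Int) : Int :=
  (dfsA (pvW ⟨colors⟩ + 1) ⟨adj_list⟩ job ⟨colors⟩ ⟨entry⟩ ⟨leave⟩ time).2.2.2

-- ===== PORT B =====
-- stack frames are (node, index of the next neighbour to look at), exactly as in Source B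
def pvFrames (adj : PySem.Dict Int (List Int)) (stack : List (Int × Nat)) : Nat :=
  (stack.map (fun fr => 1 + ((adj.getD fr.1 []).length - fr.2))).sum

-- the while-loop of Source B; no fuel: it terminates because pushing grays a white node
-- (pvW decreases) and otherwise the pending-work measure pvFrames decreases
def dfsB (adj : PySem.Dict Int (List Int)) (stack : List (Int × Nat))
    (c : PySem.Dict Int String) (e : PySem.Dict Int Int) (l : PySem.Dict Int Int) (t : Int) : Int :=
  match stack with
  | [] => t
  | (node, i) :: rest =>
    if hi : i < (adj.getD node []).length then
      if hw : (c.getD ((adj.getD node []).getD i 0) "" == "white") = true then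
        dfsB adj (((adj.getD node []).getD i 0, 0) :: (node, i + 1) :: rest)
          (c.insert ((adj.getD node []).getD i 0) "gray")
          (e.insert ((adj.getD node []).getD i 0) (t + 1)) l (t + 1)
      else
        dfsB adj ((node, i + 1) :: rest) c e l t
    else
      dfsB adj rest (c.insert node "black") e (l.insert node (t + 1)) (t + 1)
  termination_by (pvW c, pvFrames adj stack)
  decreasing_by
  · exact Prod.Lex.left _ _ (pvW_insert_lt c _ "gray" (by decide) hw)
  · apply Prod.Lex.right
    simp only [pvFrames, List.map_cons, List.sum_cons]
    omega
  · rcases Nat.lt_or_ge (pvW (c.insert node "black")) (pvW c) with h | h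
    · exact Prod.Lex.left _ _ h
    · have he : pvW (c.insert node "black") = pvW c :=
        Nat.le_antisymm (pvW_insert_le c node "black" (by decide)) h
      rw [he]
      apply Prod.Lex.right
      simp only [pvFrames, List.map_cons, List.sum_cons]
      omega

def dfs_py_alt (job : Int) (adj_list : List (Int × List Int)) (colors : List (Int × String)) (entry : List (Int × Int)) (leave : List (Int × Int)) (time : Int) : Int :=
  dfsB ⟨adj_list⟩ [(job, 0)] ((⟨colors⟩ : PySem.Dict Int String).insert job "gray")
    ((⟨entry⟩ : PySem.Dict Int Int).insert job (time + 1)) ⟨leave⟩ (time + 1)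

-- ===== PRECONDITION & SPEC =====
-- pvReach: the nodes A's traversal enters = job plus the nodes reachable from it through
-- initially-"white" nodes (one closure step per possible white key suffices to reach the fixpoint)
def pvReach (job : Int) (adj_list : List (Int × List Int)) (colors : List (Int × String)) : List Int :=
  (fun R => PySem.Set.update R
      ((R.flatMap (fun u => (⟨adj_list⟩ : PySem.Dict Int (List Int)).getD u [])).filter
        (fun n => !(n == job) && ((⟨colors⟩ : PySem.Dict Int String).getD n "" == "white"))))^[colors.length + 1]
    [job]

-- Pre_ holds exactly when A's traversal raises no KeyError: every node it enters has an adjacency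
-- entry and every neighbour it looks at has a colour entry (job itself is coloured before any lookup,
-- so it never needs one); duplicate keys in adj_list/colors — which a Python dict cannot carry, the
-- assoc-list/dict correspondence would be ambiguous — are excluded as well.
def Pre_dfs_py (job : Int) (adj_list : List (Int × List Int)) (colors : List (Int × String)) (entry : List (Int × Int)) (leave : List (Int × Int)) (time : Int) : Prop :=
  (∀ u ∈ pvReach job adj_list colors,
    u ∈ adj_list.map Prod.fst ∧
    ∀ n ∈ (⟨adj_list⟩ : PySem.Dict Int (List Int)).getD u [], n ∈ colors.map Prod.fst ∨ n = job) ∧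
  (adj_list.map Prod.fst).Nodup ∧ (colors.map Prod.fst).Nodup
instance (job : Int) (adj_list : List (Int × List Int)) (colors : List (Int × String)) (entry : List (Int × Int)) (leave : List (Int × Int)) (time : Int) : Decidable (Pre_dfs_py job adj_list colors entry leave time) := by unfold Pre_dfs_py; infer_instance

def pvWitness_dfs_py : Int × (List (Int × List Int)) × (List (Int × String)) × (List (Int × Int)) × (List (Int × Int)) × Int :=
  (0, [(0, [1]), (1, [0])], [(0, "white"), (1, "white")], [], [], 0)

def Spec_dfs_py (job : Int) (adj_list : List (Int × List Int)) (colors : List (Int × String)) (entry : List (Int × Int)) (leave : List (Int × Int)) (time : Int) (out : Int) : Prop := out = dfs_py_alt job adj_list colors entry leave time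
instance (job : Int) (adj_list : List (Int × List Int)) (colors : List (Int × String)) (entry : List (Int × Int)) (leave : List (Int × Int)) (time : Int) (out : Int) : Decidable (Spec_dfs_py job adj_list colors entry leave time out) := by unfold Spec_dfs_py; infer_instance

-- ===== CLAIM (what is proved, stated in full; the proofs are below) =====
def Claim_equal_dfs_py : Prop := ∀ (job : Int) (adj_list : List (Int × List Int)) (colors : List (Int × String)) (entry : List (Int × Int)) (leave : List (Int × Int)) (time : Int), Dom_dfs_py job adj_list colors entry leave time → Pre_dfs_py job adj_list colors entry leave time → Spec_dfs_py job adj_list colors entry leave time (dfs_py job adj_list colors entry leave time)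

-- ===== LEMMAS AND PROOFS =====

theorem pvWitness_ok :
    Dom_dfs_py (pvWitness_dfs_py.1) (pvWitness_dfs_py.2.1) (pvWitness_dfs_py.2.2.1) (pvWitness_dfs_py.2.2.2.1) (pvWitness_dfs_py.2.2.2.2.1) (pvWitness_dfs_py.2.2.2.2.2) ∧
    Pre_dfs_py (pvWitness_dfs_py.1) (pvWitness_dfs_py.2.1) (pvWitness_dfs_py.2.2.1) (pvWitness_dfs_py.2.2.2.1) (pvWitness_dfs_py.2.2.2.2.1) (pvWitness_dfs_py.2.2.2.2.2) := by
  constructor <;> decide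

-- A's traversal never creates a "white" entry, so the white count never grows
theorem pvW_dfsA_le (f : Nat) (adj : PySem.Dict Int (List Int)) :
    (∀ job c e l t, pvW (dfsA f adj job c e l t).1 ≤ pvW c) ∧
    (∀ ns c e l t, pvW (dfsAGo f adj ns c e l t).1 ≤ pvW c) := by
  induction f with
  | zero =>
    have hA : ∀ job c e l t, pvW (dfsA 0 adj job c e l t).1 ≤ pvW (c : PySem.Dict Int String) := by
      intro job c e l t; simp [dfsA]
    refine ⟨hA, ?_⟩
    intro ns
    induction ns with
    | nil => intro c e l t; simp [dfsAGo]
    | cons n ns ih =>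
      intro c e l t
      rw [dfsAGo]
      by_cases hw : (c.getD n "" == "white") = true
      · simp only [hw, if_true]
        exact le_trans (ih _ _ _ _) (hA n c e l t)
      · simp only [hw]
        exact ih _ _ _ _
  | succ f ihf =>
    have hA : ∀ job c e l t, pvW (dfsA (f + 1) adj job c e l t).1 ≤ pvW (c : PySem.Dict Int String) := by
      intro job c e l t
      rw [dfsA]
      refine le_trans (pvW_insert_le _ job "black" (by decide)) ?_
      refine le_trans (ihf.2 _ _ _ _ _) ?_
      exact pvW_insert_le _ job "gray" (by decide)
    refine ⟨hA, ?_⟩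
    intro ns
    induction ns with
    | nil => intro c e l t; simp [dfsAGo]
    | cons n ns ih =>
      intro c e l t
      rw [dfsAGo]
      by_cases hw : (c.getD n "" == "white") = true
      · simp only [hw, if_true]
        exact le_trans (ih _ _ _ _) (hA n c e l t)
      · simp only [hw]
        exact ih _ _ _ _

-- the simulation: B's loop with frame (job, i) on top behaves like A finishing job's neighbour
-- list from position i and then stamping job's leave time, provided the fuel covers the whites
theorem pvSim (adj : PySem.Dict Int (List Int)) :
    ∀ (fa : Nat) (tail : List Int) (job : Int) (i : Nat) (rest : List (Int × Nat))
      (c : PySem.Dict Int String) (e l : PySem.Dict Int Int) (t : Int),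
      tail = (adj.getD job []).drop i →
      pvW c ≤ fa →
      dfsB adj ((job, i) :: rest) c e l t =
        dfsB adj rest ((dfsAGo fa adj tail c e l t).1.insert job "black")
          (dfsAGo fa adj tail c e l t).2.1
          ((dfsAGo fa adj tail c e l t).2.2.1.insert job ((dfsAGo fa adj tail c e l t).2.2.2 + 1))
          ((dfsAGo fa adj tail c e l t).2.2.2 + 1) := by
  intro fa
  induction fa using Nat.strong_induction_on with
  | _ fa IHfa =>
    intro tail
    induction tail with
    | nil =>
      intro job i rest c e l t hdrop _
      have hlen : (adj.getD job []).length ≤ i := List.drop_eq_nil_iff.mp hdrop.symm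
      rw [dfsB, dif_neg (by omega)]
      simp [dfsAGo]
    | cons n tail' ih =>
      intro job i rest c e l t hdrop hfuel
      have hi : i < (adj.getD job []).length := by
        by_contra h
        rw [List.drop_eq_nil_iff.mpr (by omega)] at hdrop
        exact absurd hdrop (by simp)
      have hn : (adj.getD job []).getD i 0 = n := by
        have h1 : ((adj.getD job []).drop i).head? = some n := by rw [← hdrop]; rfl
        rw [List.head?_drop] at h1
        rw [List.getD_eq_getElem?_getD, h1]; rfl
      have htail' : tail' = (adj.getD job []).drop (i + 1) := by
        have h1 : ((adj.getD job []).drop i).tail = tail' := by rw [← hdrop]; rfl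
        rw [List.tail_drop] at h1; exact h1.symm
      rw [dfsB, dif_pos hi, hn]
      by_cases hw : (c.getD n "" == "white") = true
      · -- white: push n, which is A's recursive call
        rw [dif_pos hw]
        have hpos : 0 < pvW c := by
          have := pvW_insert_lt c n "gray" (by decide) hw
          omega
        obtain ⟨fa', rfl⟩ : ∃ fa', fa = fa' + 1 := ⟨fa - 1, by omega⟩
        rw [IHfa fa' (by omega) (adj.getD n []) n 0 ((job, i + 1) :: rest)
              (c.insert n "gray") (e.insert n (t + 1)) l (t + 1)
              (List.drop_zero).symm
              (by have := pvW_insert_lt c n "gray" (by decide) hw; omega)]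
        have hS : pvW ((dfsAGo fa' adj (adj.getD n [])
            (c.insert n "gray") (e.insert n (t + 1)) l (t + 1)).1.insert n "black") ≤ fa' + 1 := by
          have h1 := pvW_insert_le (dfsAGo fa' adj (adj.getD n [])
            (c.insert n "gray") (e.insert n (t + 1)) l (t + 1)).1 n "black" (by decide)
          have h2 := (pvW_dfsA_le fa' adj).2 (adj.getD n [])
            (c.insert n "gray") (e.insert n (t + 1)) l (t + 1)
          have h3 := pvW_insert_le c n "gray" (by decide)
          omega
        rw [ih job (i + 1) rest _ _ _ _ htail' hS]
        rw [show dfsAGo (fa' + 1) adj (n :: tail') c e l t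
              = dfsAGo (fa' + 1) adj tail'
                  (dfsA (fa' + 1) adj n c e l t).1 (dfsA (fa' + 1) adj n c e l t).2.1
                  (dfsA (fa' + 1) adj n c e l t).2.2.1 (dfsA (fa' + 1) adj n c e l t).2.2.2 by
            rw [dfsAGo, if_pos hw]]
        rw [show dfsA (fa' + 1) adj n c e l t
              = ((dfsAGo fa' adj (adj.getD n []) (c.insert n "gray") (e.insert n (t + 1)) l (t + 1)).1.insert n "black",
                 (dfsAGo fa' adj (adj.getD n []) (c.insert n "gray") (e.insert n (t + 1)) l (t + 1)).2.1,
                 (dfsAGo fa' adj (adj.getD n []) (c.insert n "gray") (e.insert n (t + 1)) l (t + 1)).2.2.1.insert n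
                   ((dfsAGo fa' adj (adj.getD n []) (c.insert n "gray") (e.insert n (t + 1)) l (t + 1)).2.2.2 + 1),
                 (dfsAGo fa' adj (adj.getD n []) (c.insert n "gray") (e.insert n (t + 1)) l (t + 1)).2.2.2 + 1) by
            rw [dfsA]]
      · -- non-white: skip the neighbour
        rw [dif_neg hw]
        rw [ih job (i + 1) rest c e l t htail' hfuel]
        rw [show dfsAGo fa adj (n :: tail') c e l t = dfsAGo fa adj tail' c e l t by
              rw [dfsAGo, if_neg hw]]

-- ===== VERDICT (by name: the statement is the Claim_ definition above) =====
theorem dfs_py_spec : Claim_equal_dfs_py := by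
  intro job adj_list colors entry leave time _dom _pre
  show dfs_py job adj_list colors entry leave time = dfs_py_alt job adj_list colors entry leave time
  unfold dfs_py dfs_py_alt
  rw [dfsA]
  rw [pvSim ⟨adj_list⟩ (pvW ⟨colors⟩) ((⟨adj_list⟩ : PySem.Dict Int (List Int)).getD job []) job 0 []
        ((⟨colors⟩ : PySem.Dict Int String).insert job "gray")
        ((⟨entry⟩ : PySem.Dict Int Int).insert job (time + 1)) ⟨leave⟩ (time + 1)
        (List.drop_zero).symm
        (pvW_insert_le _ job "gray" (by decide))]
  rw [dfsB]
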